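-- pv_equiv track=rewrite | github.com/aymaneelgarrai/Recherche-Operationnelle-et-Donnees-Massives | TP1/src/lab1.py | lower_bound_estimate
-- ===== SOURCE A (Python) =====
-- from collections import deque
--
-- def BFS(graph,start):
--     # Create FIFO
--     queue = deque()
--
--     # Add the start to the FIFO
--     queue.append(start)
--     # We mark the start
--     visited = dict()
--     visited[start] = 0
--     u = start
--
--     # While FIFO not empty do
--     while queue:
--         w = u
--         # Pop element
--         u = queue.popleft()
--
--         m = visited[u]
--
--         # For each v neighbour of u
--         for v in graph[u]:
--
--             # If the node has node been checked
--             if not v in visited: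
--
--                 # Add v
--                 queue.append(v)
--                 # Mark it
--                 visited.setdefault(v,m+1)
--
--
--     return visited, u, w
--
-- def lower_bound_estimate(graph,start):
--     distances = []
--     alpha = 10
--     while alpha >= 0:
--         mark, start, _ = BFS(graph, start)
--
--         distances.append(mark[start])
--         alpha -= 1
--     return max(distances)
-- ===== SOURCE B (Python) =====
-- def lower_bound_estimate(graph, start):
--     best = 0
--     for _ in range(11):
--         start, ecc = _sweep(graph, start)
--         if ecc > best:
--             best = ecc
--     return best
--
-- def _sweep(graph, start):
--     # level-synchronous BFS: returns (last node discovered, eccentricity of start)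
--     visited = {start}
--     frontier = [start]
--     last = start
--     depth = 0
--     while True:
--         nxt = []
--         for u in frontier:
--             for v in graph[u]:
--                 if v not in visited:
--                     visited.add(v)
--                     nxt.append(v)
--         if not nxt:
--             return last, depth
--         last = nxt[-1]
--         depth += 1
--         frontier = nxt
-- ===== Notes on version B (the rewrite author's own statement) =====
-- stated objective: alternative
-- what changed: Replaces A's FIFO-queue BFS that records a distance for every node in a dictionary by a level-synchronous BFS that keeps only a frontier list, a visited set and a depth counter (eccentricity = number of non-empty levels, farthest node = last node of the last level), and replaces the collected distances list + max() by a running maximum over the 11 sweeps.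
import Mathlib
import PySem

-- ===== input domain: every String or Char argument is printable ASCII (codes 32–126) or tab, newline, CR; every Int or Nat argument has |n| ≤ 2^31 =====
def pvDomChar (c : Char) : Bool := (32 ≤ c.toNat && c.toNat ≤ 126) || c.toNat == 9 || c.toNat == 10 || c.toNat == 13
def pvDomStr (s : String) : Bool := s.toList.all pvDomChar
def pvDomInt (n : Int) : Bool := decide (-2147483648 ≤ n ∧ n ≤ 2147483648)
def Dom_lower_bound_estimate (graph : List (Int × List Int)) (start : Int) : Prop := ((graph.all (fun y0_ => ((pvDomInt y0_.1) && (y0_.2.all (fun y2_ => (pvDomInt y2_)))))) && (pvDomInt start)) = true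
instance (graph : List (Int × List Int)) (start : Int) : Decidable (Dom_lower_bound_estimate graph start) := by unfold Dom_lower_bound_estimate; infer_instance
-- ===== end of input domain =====

-- B replaces A's FIFO-queue BFS with a distance dictionary by a level-synchronous BFS
-- (frontier list + visited set + depth counter); same return value, different bookkeeping.

-- fuel bound shared by both ports: 2 + total length of all adjacency lists; the fuel only makes
-- the while-loops structural (inside Pre_ it is never exhausted, as the proofs below show)
def pvFuel (graph : List (Int × List Int)) : Nat :=
  graph.foldl (fun a p => a + p.2.length) 0 + 2

-- ===== PORT A =====
-- body of A's inner "for v in graph[u]" loop (state: queue, visited)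
def nbrStepA (m : Int) (st : List Int × PySem.Dict Int Int) (v : Int) :
    List Int × PySem.Dict Int Int :=
  if st.2.contains v then st else (st.1 ++ [v], st.2.setdefault v (m + 1))

-- the while-loop of A's BFS: queue, fuel, visited dict, u, w; none = KeyError (or fuel out)
def bfsLoopA (g : PySem.Dict Int (List Int)) :
    List Int → Nat → PySem.Dict Int Int → Int → Int →
    Option (PySem.Dict Int Int × Int × Int)
  | [], _, vis, u, w => some (vis, u, w)
  | _ :: _, 0, _, _, _ => none
  | q0 :: qs, f + 1, vis, u, _w =>
    let w' := u
    let u' := q0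
    match vis.get? u' with
    | none => none                 -- KeyError on visited[u] (never reached)
    | some m =>
      match g.get? u' with
      | none => none               -- KeyError on graph[u]
      | some ns =>
        let st := ns.foldl (nbrStepA m) (qs, vis)
        bfsLoopA g st.1 f st.2 u' w'

def BFS_A (g : PySem.Dict Int (List Int)) (start : Int) (fuel : Nat) :
    Option (PySem.Dict Int Int × Int × Int) :=
  bfsLoopA g [start] fuel ((PySem.Dict.empty).insert start 0) start start

-- the alpha-loop of A (alpha = 10 down to 0 → 11 iterations), collecting mark[start] values
def lbeLoopA (g : PySem.Dict Int (List Int)) (fuel : Nat) :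
    Nat → Int → List Int → Option (List Int)
  | 0, _, ds => some ds
  | k + 1, s, ds =>
    match BFS_A g s fuel with
    | none => none
    | some (mark, u, _) =>
      match mark.get? u with
      | none => none
      | some dd => lbeLoopA g fuel k u (ds ++ [dd])

def lower_bound_estimate (graph : List (Int × List Int)) (start : Int) : Int :=
  match lbeLoopA (PySem.Dict.mk graph) (pvFuel graph) 11 start [] with
  | none => 0                                            -- KeyError path, outside Pre_
  | some ds => (PySem.List.max? ds (fun x => x)).getD 0  -- max(distances); ds is never empty

-- ===== PORT B =====
-- body of B's inner "for v in graph[u]" loop (state: next frontier, visited set)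
def nbrStepB (st : List Int × PySem.Set Int) (v : Int) : List Int × PySem.Set Int :=
  if PySem.Set.contains st.2 v then st else (st.1 ++ [v], PySem.Set.add st.2 v)

-- one level of B's sweep: next frontier from unvisited neighbours, marking them visited
def sweepLevelB (g : PySem.Dict Int (List Int)) (frontier : List Int)
    (visited : PySem.Set Int) : List Int × PySem.Set Int :=
  frontier.foldl (fun st u => (g.getD u []).foldl nbrStepB st) ([], visited)

-- the while-True loop of B's _sweep
def sweepLoopB (g : PySem.Dict Int (List Int)) :
    Nat → List Int → PySem.Set Int → Int → Int → Int × Int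
  | 0, _, _, last, depth => (last, depth)
  | f + 1, frontier, visited, last, depth =>
    let st := sweepLevelB g frontier visited
    if st.1.isEmpty then (last, depth)
    else sweepLoopB g f st.1 st.2 (st.1.getLast?.getD 0) (depth + 1)

def sweepB (g : PySem.Dict Int (List Int)) (fuel : Nat) (start : Int) : Int × Int :=
  sweepLoopB g fuel [start] (PySem.Set.add PySem.Set.empty start) start 0

-- B's for-loop over range(11), carrying (start, best)
def lbeLoopB (g : PySem.Dict Int (List Int)) (fuel : Nat) : Nat → Int → Int → Int
  | 0, _, best => best
  | k + 1, s, best =>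
    let r := sweepB g fuel s
    lbeLoopB g fuel k r.1 (if r.2 > best then r.2 else best)

def lower_bound_estimate_alt (graph : List (Int × List Int)) (start : Int) : Int :=
  lbeLoopB (PySem.Dict.mk graph) (pvFuel graph) 11 start 0

-- ===== PRECONDITION & SPEC =====
-- all neighbour occurrences of the graph
def allN (graph : List (Int × List Int)) : List Int := graph.flatMap (·.2)

-- one step of the reachability closure: add all neighbours of keys already reached
def reachStep (graph : List (Int × List Int)) (R : List Int) : List Int :=
  R ++ ((graph.flatMap (fun p => if p.1 ∈ R then p.2 else [])).filter (fun v => v ∉ R)).dedup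

-- the set of nodes reachable from start ((allN).length + 1 closure steps reach the fixpoint)
def reachSet (graph : List (Int × List Int)) (start : Int) : List Int :=
  (reachStep graph)^[(allN graph).length + 1] [start]

-- Pre_ excludes exactly the inputs on which A raises KeyError: those where start, or some node
-- reachable from start along adjacency lists, is not a key of the dict.
def Pre_lower_bound_estimate (graph : List (Int × List Int)) (start : Int) : Prop :=
  start ∈ graph.map (·.1) ∧ ∀ x ∈ reachSet graph start, x ∈ graph.map (·.1)
instance (graph : List (Int × List Int)) (start : Int) : Decidable (Pre_lower_bound_estimate graph start) := by unfold Pre_lower_bound_estimate; infer_instance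

def pvWitness_lower_bound_estimate : (List (Int × List Int)) × Int :=
  ([(0, [1]), (1, [0, 2]), (2, [])], 0)

def Spec_lower_bound_estimate (graph : List (Int × List Int)) (start : Int) (out : Int) : Prop := out = lower_bound_estimate_alt graph start
instance (graph : List (Int × List Int)) (start : Int) (out : Int) : Decidable (Spec_lower_bound_estimate graph start out) := by unfold Spec_lower_bound_estimate; infer_instance

-- ===== CLAIM (what is proved, stated in full; the proofs are below) =====
def Claim_equal_lower_bound_estimate : Prop := ∀ (graph : List (Int × List Int)) (start : Int), Dom_lower_bound_estimate graph start → Pre_lower_bound_estimate graph start → Spec_lower_bound_estimate graph start (lower_bound_estimate graph start)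

-- ===== LEMMAS AND PROOFS =====

-- A's whole-frontier processing (proof-side view of one BFS level), discoveries accumulated in D
def stepA (g : PySem.Dict Int (List Int)) :
    List Int → List Int → PySem.Dict Int Int → Option (List Int × PySem.Dict Int Int)
  | [], D, vis => some (D, vis)
  | u :: F, D, vis =>
    match vis.get? u, g.get? u with
    | some m, some ns =>
      let st := ns.foldl (nbrStepA m) (D, vis)
      stepA g F st.1 st.2
    | _, _ => none

theorem mem_reachStep (graph : List (Int × List Int)) (R : List Int) (x : Int) :
    x ∈ reachStep graph R ↔ x ∈ R ∨ ∃ p ∈ graph, p.1 ∈ R ∧ x ∈ p.2 := by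
  simp only [reachStep, List.mem_append, List.mem_dedup, List.mem_filter, List.mem_flatMap,
    decide_eq_true_eq]
  constructor
  · rintro (h | ⟨⟨p, hp, hx⟩, _⟩)
    · exact Or.inl h
    · by_cases h1 : p.1 ∈ R
      · exact Or.inr ⟨p, hp, h1, by simpa [h1] using hx⟩
      · simp [h1] at hx
  · rintro (h | ⟨p, hp, hp1, hx⟩)
    · exact Or.inl h
    · by_cases hxR : x ∈ R
      · exact Or.inl hxR
      · exact Or.inr ⟨⟨p, hp, by simp [hp1, hx]⟩, by simpa using hxR⟩

theorem subset_reachStep (graph : List (Int × List Int)) (R : List Int) :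
    ∀ x ∈ R, x ∈ reachStep graph R := by
  intro x hx; rw [mem_reachStep]; exact Or.inl hx

theorem reachStep_closed (graph : List (Int × List Int)) (R : List Int)
    (h : reachStep graph R = R) :
    ∀ p ∈ graph, p.1 ∈ R → ∀ v ∈ p.2, v ∈ R := by
  intro p hp hp1 v hv
  have : v ∈ reachStep graph R := (mem_reachStep graph R v).mpr (Or.inr ⟨p, hp, hp1, hv⟩)
  rwa [h] at this

theorem reachStep_new_mem_allN (graph : List (Int × List Int)) (R : List Int) (x : Int)
    (hx : x ∈ reachStep graph R) (hxR : x ∉ R) : x ∈ allN graph := by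
  rcases (mem_reachStep graph R x).mp hx with h | ⟨p, hp, _, hx2⟩
  · exact absurd h hxR
  · exact List.mem_flatMap.mpr ⟨p, hp, hx2⟩

theorem reachStep_ne_measure (graph : List (Int × List Int)) (R : List Int)
    (h : reachStep graph R ≠ R) :
    ((allN graph).toFinset \ (reachStep graph R).toFinset).card <
      ((allN graph).toFinset \ R.toFinset).card := by
  have hnew : ∃ x, x ∈ reachStep graph R ∧ x ∉ R := by
    by_contra hc
    push_neg at hc
    apply h
    rw [reachStep]
    have : ((graph.flatMap (fun p => if p.1 ∈ R then p.2 else [])).filter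
        (fun v => v ∉ R)).dedup = [] := by
      rw [List.dedup_eq_nil, List.filter_eq_nil_iff]
      intro a ha
      simp only [decide_eq_true_eq, Decidable.not_not]
      by_contra haR
      have : a ∈ reachStep graph R := by
        rw [reachStep, List.mem_append, List.mem_dedup, List.mem_filter]
        exact Or.inr ⟨ha, by simpa using haR⟩
      exact (by simpa using haR : a ∉ R) (hc a this)
    rw [this, List.append_nil]
  obtain ⟨x, hx1, hx2⟩ := hnew
  apply Finset.card_lt_card
  rw [Finset.ssubset_iff_of_subset]
  · exact ⟨x, by
      rw [Finset.mem_sdiff, List.mem_toFinset, List.mem_toFinset]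
      exact ⟨reachStep_new_mem_allN graph R x hx1 hx2, hx2⟩,
      by
      rw [Finset.mem_sdiff, List.mem_toFinset, List.mem_toFinset]
      push_neg
      intro _; exact hx1⟩
  · intro a ha
    rw [Finset.mem_sdiff, List.mem_toFinset, List.mem_toFinset] at ha ⊢
    exact ⟨ha.1, fun haR => ha.2 (subset_reachStep graph R a haR)⟩

theorem reachSet_fix (graph : List (Int × List Int)) (start : Int) :
    reachStep graph (reachSet graph start) = reachSet graph start := by
  set f := reachStep graph with hf
  set m := (allN graph).length + 1 with hm
  set ν := fun (R : List Int) => ((allN graph).toFinset \ R.toFinset).card with hν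
  have key : ∀ m' : Nat, (∀ k < m', f (f^[k] [start]) ≠ f^[k] [start]) →
      ν (f^[m'] [start]) + m' ≤ ν [start] := by
    intro m'
    induction m' with
    | zero => intro _; simp
    | succ n ihn =>
      intro h
      have h1 := ihn (fun k hk => h k (by omega))
      have h2 : ν (f^[n + 1] [start]) < ν (f^[n] [start]) := by
        rw [Function.iterate_succ_apply']
        exact reachStep_ne_measure graph _ (h n (by omega))
      omega
  have hν0 : ν [start] ≤ (allN graph).length :=
    le_trans (Finset.card_le_card Finset.sdiff_subset) (List.toFinset_card_le _)
  have hex : ∃ k, k < m ∧ f (f^[k] [start]) = f^[k] [start] := by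
    by_contra hc
    push_neg at hc
    have := key m (fun k hk => hc k hk)
    omega
  obtain ⟨k, hk, hfix⟩ := hex
  have hstable : f^[m] [start] = f^[k] [start] := by
    have : m = (m - k) + k := by omega
    rw [this, Function.iterate_add_apply]
    exact Function.iterate_fixed hfix (m - k)
  show f (f^[m] [start]) = f^[m] [start]
  rw [hstable, hfix]

theorem start_mem_reachSet (graph : List (Int × List Int)) (start : Int) :
    start ∈ reachSet graph start := by
  rw [reachSet]
  generalize (allN graph).length + 1 = m
  induction m with
  | zero => simp
  | succ n ihn =>
    rw [Function.iterate_succ_apply']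
    exact subset_reachStep graph _ start ihn

theorem sumLens_eq (graph : List (Int × List Int)) :
    graph.foldl (fun a p => a + p.2.length) 0 = (allN graph).length := by
  suffices h : ∀ (l : List (Int × List Int)) (a : Nat),
      l.foldl (fun a p => a + p.2.length) a = a + (l.flatMap (·.2)).length by
    simpa [allN] using h graph 0
  intro l
  induction l with
  | nil => intro a; simp
  | cons p t ih => intro a; simp [ih, Nat.add_assoc]

theorem maxFold (ms : List Int) (h : ∀ x ∈ ms, (0:Int) ≤ x) :
    (PySem.List.max? ms (fun x => x)).getD 0 =
      ms.foldl (fun b x => if x > b then x else b) 0 := by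
  have hfold : ∀ (t : List Int) (b : Int),
      t.foldl (fun b x => if x > b then x else b) b = t.foldl max b := by
    intro t
    induction t with
    | nil => intro b; rfl
    | cons x s ih =>
      intro b
      simp only [List.foldl_cons, ih]
      congr 1
      split_ifs with hx
      · exact (max_eq_right (le_of_lt hx)).symm
      · exact (max_eq_left (not_lt.mp hx)).symm
  cases ms with
  | nil => rfl
  | cons m0 t =>
    rw [PySem.List.max?_id_cons, hfold]
    have hm0 : (0:Int) ≤ m0 := h m0 (by simp)
    simp only [List.foldl_cons, Option.getD_some]
    rw [max_eq_right hm0]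

theorem set_contains_append (S T : List Int) (x : Int) :
    PySem.Set.contains (S ++ T) x = (PySem.Set.contains S x || PySem.Set.contains T x) := by
  simp [PySem.Set.contains, List.contains_eq_mem]

theorem foldAB (m : Int) (ns : List Int) : ∀ (D : List Int) (vis : PySem.Dict Int Int) (S : PySem.Set Int),
    (∀ x : Int, vis.contains x = PySem.Set.contains S x) →
    ∃ δ vis',
      ns.foldl (nbrStepA m) (D, vis) = (D ++ δ, vis') ∧
      ns.foldl nbrStepB (D, S) = (D ++ δ, S ++ δ) ∧
      (∀ x : Int, vis'.contains x = PySem.Set.contains (S ++ δ) x) ∧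
      (∀ x : Int, vis.contains x = true → vis'.get? x = vis.get? x) ∧
      (∀ x ∈ δ, vis'.get? x = some (m + 1) ∧ PySem.Set.contains S x = false ∧ x ∈ ns) ∧
      δ.Nodup := by
  induction ns with
  | nil =>
    intro D vis S hmem
    exact ⟨[], vis, by simp, by simp, by simpa using hmem, fun x _ => rfl, by simp, List.nodup_nil⟩
  | cons v t ih =>
    intro D vis S hmem
    by_cases hv : vis.contains v = true
    · have hSv : PySem.Set.contains S v = true := by rw [← hmem]; exact hv
      obtain ⟨δ, vis', h1, h2, h3, h4, h5, h6⟩ := ih D vis S hmem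
      refine ⟨δ, vis', ?_, ?_, h3, h4, ?_, h6⟩
      · simpa [nbrStepA, hv] using h1
      · have hvSm : v ∈ S := by simpa [PySem.Set.contains, List.contains_eq_mem] using hSv
        have hstep : nbrStepB (D, S) v = (D, S) := by
          simp [nbrStepB, PySem.Set.contains, List.contains_eq_mem, hvSm]
        rw [List.foldl_cons, hstep]; exact h2
      · intro x hx
        obtain ⟨ha, hb, hc⟩ := h5 x hx
        exact ⟨ha, hb, by simp [hc]⟩
    · have hv' : vis.contains v = false := by simpa using hv
      have hSv : PySem.Set.contains S v = false := by rw [← hmem]; exact hv'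
      have hsd : vis.setdefault v (m + 1) = vis.insert v (m + 1) :=
        PySem.Dict.setdefault_of_not_contains vis (m + 1) hv'
      set vis₁ := vis.insert v (m + 1) with hvis₁
      have hmem₁ : ∀ x : Int, vis₁.contains x = PySem.Set.contains (S ++ [v]) x := by
        intro x
        rw [hvis₁, PySem.Dict.contains_insert, hmem]
        by_cases hx : x = v <;> by_cases hxs : x ∈ S <;>
          simp [PySem.Set.contains, List.contains_eq_mem, hx, hxs]
      obtain ⟨δ, vis', h1, h2, h3, h4, h5, h6⟩ := ih (D ++ [v]) vis₁ (S ++ [v]) hmem₁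
      refine ⟨v :: δ, vis', ?_, ?_, ?_, ?_, ?_, ?_⟩
      · simpa [nbrStepA, hv', hsd, ← hvis₁] using h1
      · have hvS : v ∉ S := by simpa [PySem.Set.contains, List.contains_eq_mem] using hSv
        have hstep : nbrStepB (D, S) v = (D ++ [v], S ++ [v]) := by
          simp [nbrStepB, PySem.Set.add, PySem.Set.contains, List.contains_eq_mem, hvS]
        rw [show D ++ v :: δ = (D ++ [v]) ++ δ by simp, show S ++ v :: δ = (S ++ [v]) ++ δ by simp,
          List.foldl_cons, hstep]
        exact h2
      · intro x
        rw [show S ++ v :: δ = (S ++ [v]) ++ δ by simp]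
        exact h3 x
      · intro x hx
        have hx₁ : vis₁.contains x = true := by
          rw [hvis₁, PySem.Dict.contains_insert, hx]; simp
        have hne : x ≠ v := by rintro rfl; rw [hv'] at hx; exact absurd hx (by simp)
        rw [h4 x hx₁, hvis₁, PySem.Dict.get?_insert_of_ne vis (m + 1) hne]
      · intro x hx
        rcases List.mem_cons.mp hx with rfl | hxδ
        · have hx₁ : vis₁.contains x = true := by
            rw [hvis₁]; exact PySem.Dict.contains_insert_self vis _ _
          refine ⟨?_, hSv, by simp⟩
          rw [h4 x hx₁, hvis₁, PySem.Dict.get?_insert_self]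
        · obtain ⟨ha, hb, hc⟩ := h5 x hxδ
          rw [set_contains_append] at hb
          exact ⟨ha, by simpa using (Bool.or_eq_false_iff.mp hb).1, by simp [hc]⟩
      · refine List.nodup_cons.mpr ⟨?_, h6⟩
        intro hvδ
        obtain ⟨_, hb, _⟩ := h5 v hvδ
        rw [set_contains_append] at hb
        have := (Bool.or_eq_false_iff.mp hb).2
        simp [PySem.Set.contains, List.contains_eq_mem] at this

theorem foldA_split (m : Int) (ns : List Int) : ∀ (q D : List Int) (vis : PySem.Dict Int Int),
    ns.foldl (nbrStepA m) (q ++ D, vis) =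
      (q ++ (ns.foldl (nbrStepA m) (D, vis)).1, (ns.foldl (nbrStepA m) (D, vis)).2) := by
  induction ns with
  | nil => intro q D vis; simp
  | cons v t ih =>
    intro q D vis
    simp only [List.foldl_cons, nbrStepA]
    by_cases h : vis.contains v = true
    · simp [h, ih]
    · simp only [Bool.not_eq_true] at h
      simp only [h, Bool.false_eq_true, if_false]
      rw [show (q ++ D) ++ [v] = q ++ (D ++ [v]) by simp, ih]

theorem levelAB (g : PySem.Dict Int (List Int)) (N : List Int) (R : List Int)
    (hRk : ∀ x ∈ R, g.contains x = true)
    (hRc : ∀ u ∈ R, ∀ ns, g.get? u = some ns → ∀ v ∈ ns, v ∈ R)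
    (hsub : ∀ u ns, g.get? u = some ns → ∀ v ∈ ns, v ∈ N) :
    ∀ (F D : List Int) (vis : PySem.Dict Int Int) (S : PySem.Set Int) (d : Int),
    (∀ x : Int, vis.contains x = PySem.Set.contains S x) →
    (∀ u ∈ F, vis.get? u = some d ∧ u ∈ R) →
    ∃ δ vis',
      stepA g F D vis = some (D ++ δ, vis') ∧
      F.foldl (fun st u => (g.getD u []).foldl nbrStepB st) (D, S) = (D ++ δ, S ++ δ) ∧
      (∀ x : Int, vis'.contains x = PySem.Set.contains (S ++ δ) x) ∧
      (∀ x : Int, vis.contains x = true → vis'.get? x = vis.get? x) ∧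
      (∀ x ∈ δ, vis'.get? x = some (d + 1) ∧ PySem.Set.contains S x = false ∧
        x ∈ R ∧ x ∈ N) ∧
      δ.Nodup := by
  intro F
  induction F with
  | nil =>
    intro D vis S d hmem hF
    exact ⟨[], vis, by simp [stepA], by simp, by simpa using hmem, fun x _ => rfl, by simp,
      List.nodup_nil⟩
  | cons u F ih =>
    intro D vis S d hmem hF
    obtain ⟨hgu, huR⟩ := hF u (by simp)
    have hgc : g.contains u = true := hRk u huR
    have hns : ∃ ns, g.get? u = some ns := by
      rw [PySem.Dict.contains_eq_isSome_get?] at hgc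
      exact Option.isSome_iff_exists.mp hgc
    obtain ⟨ns, hns⟩ := hns
    obtain ⟨δ₁, vis₁, a1, a2, a3, a4, a5, a6⟩ := foldAB d ns D vis S hmem
    have hF₁ : ∀ u' ∈ F, vis₁.get? u' = some d ∧ u' ∈ R := by
      intro u' hu'
      obtain ⟨h1, h2⟩ := hF u' (by simp [hu'])
      refine ⟨?_, h2⟩
      rw [a4 u' (by rw [PySem.Dict.contains_eq_isSome_get?, h1]; rfl), h1]
    obtain ⟨δ₂, vis', b1, b2, b3, b4, b5, b6⟩ := ih (D ++ δ₁) vis₁ (S ++ δ₁) d a3 hF₁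
    refine ⟨δ₁ ++ δ₂, vis', ?_, ?_, ?_, ?_, ?_, ?_⟩
    · show stepA g (u :: F) D vis = _
      rw [stepA, hgu, hns]
      simpa [a1, List.append_assoc] using b1
    · rw [List.foldl_cons]
      have : (g.getD u []).foldl nbrStepB (D, S) = (D ++ δ₁, S ++ δ₁) := by
        rw [PySem.Dict.getD_of_get?_eq_some g [] hns]; exact a2
      rw [this]
      simpa [List.append_assoc] using b2
    · intro x; rw [b3 x]; simp [List.append_assoc]
    · intro x hx
      have hx₁ : vis₁.contains x = true := by
        rw [a3, set_contains_append]
        rw [hmem] at hx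
        have hxm : x ∈ S := by simpa [PySem.Set.contains, List.contains_eq_mem] using hx
        simp [PySem.Set.contains, List.contains_eq_mem, hxm]
      rw [b4 x hx₁, a4 x hx]
    · intro x hx
      rcases List.mem_append.mp hx with hx₁ | hx₂
      · obtain ⟨c1, c2, c3⟩ := a5 x hx₁
        have hc : vis₁.contains x = true := by
          rw [PySem.Dict.contains_eq_isSome_get?, c1]; rfl
        exact ⟨by rw [b4 x hc, c1], c2, hRc u huR ns hns x c3, hsub u ns hns x c3⟩
      · obtain ⟨c1, c2, c3, c4⟩ := b5 x hx₂
        rw [set_contains_append] at c2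
        exact ⟨c1, (Bool.or_eq_false_iff.mp c2).1, c3, c4⟩
    · refine List.Nodup.append a6 b6 (List.disjoint_left.mpr ?_)
      intro x hx₁ hx₂
      obtain ⟨_, c2, _, _⟩ := b5 x hx₂
      rw [set_contains_append] at c2
      have := (Bool.or_eq_false_iff.mp c2).2
      simp [PySem.Set.contains, List.contains_eq_mem] at this
      exact this hx₁

theorem bfsLoopA_split (g : PySem.Dict Int (List Int)) :
    ∀ (F : List Int) (f : Nat) (D : List Int) (vis : PySem.Dict Int Int) (u w : Int)
      (D' : List Int) (vis' : PySem.Dict Int Int),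
    stepA g F D vis = some (D', vis') →
    bfsLoopA g (F ++ D) (f + F.length) vis u w =
      bfsLoopA g D' f vis'
        (F.foldl (fun p x => (x, p.1)) (u, w)).1
        (F.foldl (fun p x => (x, p.1)) (u, w)).2 := by
  intro F
  induction F with
  | nil =>
    intro f D vis u w D' vis' h
    simp only [stepA, Option.some.injEq, Prod.mk.injEq] at h
    obtain ⟨rfl, rfl⟩ := h
    simp
  | cons q F ih =>
    intro f D vis u w D' vis' h
    rw [stepA] at h
    cases hg1 : vis.get? q with
    | none => rw [hg1] at h; simp at h
    | some m =>
      cases hg2 : g.get? q with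
      | none => rw [hg1, hg2] at h; simp at h
      | some ns =>
        rw [hg1, hg2] at h
        simp only [List.cons_append, List.length_cons]
        rw [show f + (F.length + 1) = (f + F.length) + 1 by omega]
        rw [bfsLoopA]
        simp only [hg1, hg2]
        rw [foldA_split]
        exact ih f _ _ q u D' vis' h

theorem foldPair_fst (F : List Int) : ∀ (u w : Int),
    (F.foldl (fun (p : Int × Int) x => (x, p.1)) (u, w)).1 = F.getLast?.getD u := by
  induction F with
  | nil => intro u w; simp
  | cons x t ih =>
    intro u w
    simp only [List.foldl_cons, ih]
    cases t <;> simp [List.getLast?]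

theorem getLast?_getD_eq (F : List Int) (hF : F ≠ []) (a b : Int) :
    F.getLast?.getD a = F.getLast?.getD b := by
  cases h : F.getLast? with
  | none => exact absurd (List.getLast?_eq_none_iff.mp h) hF
  | some x => rfl

theorem card_step (N S δ : List Int) (hnd : δ.Nodup) (hN : ∀ x ∈ δ, x ∈ N)
    (hS : ∀ x ∈ δ, x ∉ S) :
    (N.toFinset \ (S ++ δ).toFinset).card + δ.length = (N.toFinset \ S.toFinset).card := by
  have hsub : δ.toFinset ⊆ N.toFinset \ S.toFinset := by
    intro x hx
    rw [List.mem_toFinset] at hx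
    rw [Finset.mem_sdiff, List.mem_toFinset, List.mem_toFinset]
    exact ⟨hN x hx, hS x hx⟩
  have h1 : N.toFinset \ (S ++ δ).toFinset = (N.toFinset \ S.toFinset) \ δ.toFinset := by
    ext a
    simp only [Finset.mem_sdiff, List.mem_toFinset, List.mem_append]
    tauto
  have hlen : δ.toFinset.card = δ.length := List.toFinset_card_of_nodup hnd
  have hle : δ.length ≤ (N.toFinset \ S.toFinset).card := by
    rw [← hlen]; exact Finset.card_le_card hsub
  rw [h1, Finset.card_sdiff, Finset.inter_eq_left.mpr hsub, hlen]
  omega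

theorem mainAB (g : PySem.Dict Int (List Int)) (N : List Int) (R : List Int)
    (hRk : ∀ x ∈ R, g.contains x = true)
    (hRc : ∀ u ∈ R, ∀ ns, g.get? u = some ns → ∀ v ∈ ns, v ∈ R)
    (hsub : ∀ u ns, g.get? u = some ns → ∀ v ∈ ns, v ∈ N) :
    ∀ (fB : Nat) (F : List Int) (vis : PySem.Dict Int Int) (S : PySem.Set Int)
      (last d : Int) (fA : Nat) (u w : Int),
    (∀ x : Int, vis.contains x = PySem.Set.contains S x) →
    (∀ u' ∈ F, vis.get? u' = some d ∧ u' ∈ R) →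
    F ≠ [] →
    last = F.getLast?.getD 0 →
    (N.toFinset \ S.toFinset).card + F.length ≤ fA →
    (N.toFinset \ S.toFinset).card < fB →
    ∃ lf df visf wf,
      bfsLoopA g F fA vis u w = some (visf, lf, wf) ∧
      sweepLoopB g fB F S last d = (lf, df) ∧
      visf.get? lf = some df ∧ lf ∈ R ∧ d ≤ df := by
  intro fB
  induction fB with
  | zero => intro F vis S last d fA u w _ _ _ _ _ hB; omega
  | succ fB ih =>
    intro F vis S last d fA u w hmem hF hFne hlast hA hB
    obtain ⟨δ, vis', l1, l2, l3, l4, l5, l6⟩ := levelAB g N R hRk hRc hsub F [] vis S d hmem hF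
    have hlev : sweepLevelB g F S = (δ, S ++ δ) := by
      rw [sweepLevelB]; simpa using l2
    have hFlen : F.length ≤ fA := by omega
    have hsplit := bfsLoopA_split g F (fA - F.length) [] vis u w δ vis'
      (by simpa using l1)
    rw [show fA - F.length + F.length = fA by omega] at hsplit
    have hA' : bfsLoopA g F fA vis u w =
        bfsLoopA g δ (fA - F.length) vis'
          (F.foldl (fun p x => (x, p.1)) (u, w)).1
          (F.foldl (fun p x => (x, p.1)) (u, w)).2 := by
      rw [← hsplit]; simp
    have hlastF : last ∈ F := by
      rw [hlast]
      cases hgl : F.getLast? with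
      | none => exact absurd (List.getLast?_eq_none_iff.mp hgl) hFne
      | some x => simpa using List.mem_of_getLast? hgl
    have hcard := card_step N S δ l6 (fun x hx => (l5 x hx).2.2.2)
      (fun x hx => by
        have := (l5 x hx).2.1
        simpa [PySem.Set.contains, List.contains_eq_mem] using this)
    cases hδ : δ with
    | nil =>
      subst hδ
      refine ⟨last, d, vis', (F.foldl (fun p x => (x, p.1)) (u, w)).2, ?_, ?_, ?_, ?_, le_refl d⟩
      · have hfp : (F.foldl (fun (p : Int × Int) x => (x, p.1)) (u, w)).1 = last := by
          rw [foldPair_fst, hlast]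
          exact getLast?_getD_eq F hFne u 0
        rw [hA', hfp, bfsLoopA]
      · rw [sweepLoopB]
        simp [hlev]
      · rw [l4 last (by rw [PySem.Dict.contains_eq_isSome_get?, (hF last hlastF).1]; rfl)]
        exact (hF last hlastF).1
      · exact (hF last hlastF).2
    | cons x0 δt =>
      subst hδ
      have hδne : (x0 :: δt) ≠ [] := by simp
      obtain ⟨lf, df, visf, wf, r1, r2, r3, r4, r5⟩ :=
        ih (x0 :: δt) vis' (S ++ x0 :: δt) ((x0 :: δt).getLast?.getD 0) (d + 1)
          (fA - F.length)
          (F.foldl (fun p x => (x, p.1)) (u, w)).1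
          (F.foldl (fun p x => (x, p.1)) (u, w)).2
          l3
          (fun u' hu' => ⟨(l5 u' hu').1, (l5 u' hu').2.2.1⟩)
          hδne rfl
          (by simp only [List.length_cons] at hcard ⊢; omega)
          (by simp only [List.length_cons] at hcard ⊢; omega)
      refine ⟨lf, df, visf, wf, ?_, ?_, r3, r4, by omega⟩
      · rw [hA']; exact r1
      · rw [sweepLoopB]
        simp only [hlev]
        simp [List.isEmpty_cons]
        exact r2

theorem bfsAB (graph : List (Int × List Int)) (R : List Int)
    (hRk : ∀ x ∈ R, (PySem.Dict.mk graph).contains x = true)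
    (hRc : ∀ u ∈ R, ∀ ns, (PySem.Dict.mk graph).get? u = some ns → ∀ v ∈ ns, v ∈ R)
    (hsub : ∀ u ns, (PySem.Dict.mk graph).get? u = some ns → ∀ v ∈ ns, v ∈ allN graph)
    (s : Int) (hsR : s ∈ R) :
    ∃ lf df visf wf,
      BFS_A (PySem.Dict.mk graph) s (pvFuel graph) = some (visf, lf, wf) ∧
      sweepB (PySem.Dict.mk graph) (pvFuel graph) s = (lf, df) ∧
      visf.get? lf = some df ∧ lf ∈ R ∧ 0 ≤ df := by
  have hs : (PySem.Dict.mk graph).contains s = true := hRk s hsR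
  have hadd : PySem.Set.add PySem.Set.empty s = [s] := by
    simp [PySem.Set.add, PySem.Set.empty, PySem.Set.contains]
  have hmem : ∀ x : Int,
      ((PySem.Dict.empty : PySem.Dict Int Int).insert s 0).contains x =
        PySem.Set.contains [s] x := by
    intro x
    rw [PySem.Dict.contains_insert]
    by_cases hx : x = s <;>
      simp [hx, PySem.Dict.contains_empty, PySem.Set.contains, List.contains_eq_mem]
  have hcard : ((allN graph).toFinset \ ([s] : List Int).toFinset).card ≤ (allN graph).length :=
    le_trans (Finset.card_le_card Finset.sdiff_subset) (List.toFinset_card_le _)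
  have hfuel : pvFuel graph = (allN graph).length + 2 := by
    rw [pvFuel, sumLens_eq]
  obtain ⟨lf, df, visf, wf, r1, r2, r3, r4, r5⟩ :=
    mainAB (PySem.Dict.mk graph) (allN graph) R hRk hRc hsub
      (pvFuel graph) [s] ((PySem.Dict.empty).insert s 0) [s] s 0 (pvFuel graph) s s
      hmem
      (fun u' hu' => by
        rcases List.mem_singleton.mp hu' with rfl
        exact ⟨PySem.Dict.get?_insert_self _ _ _, hsR⟩)
      (by simp) (by simp)
      (by rw [hfuel]; simpa using Nat.add_le_add hcard (by omega : 1 ≤ 2))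
      (by omega)
  exact ⟨lf, df, visf, wf, r1, by rw [sweepB, hadd]; exact r2, r3, r4, r5⟩

theorem chainAB (graph : List (Int × List Int)) (R : List Int)
    (hRk : ∀ x ∈ R, (PySem.Dict.mk graph).contains x = true)
    (hRc : ∀ u ∈ R, ∀ ns, (PySem.Dict.mk graph).get? u = some ns → ∀ v ∈ ns, v ∈ R)
    (hsub : ∀ u ns, (PySem.Dict.mk graph).get? u = some ns → ∀ v ∈ ns, v ∈ allN graph) :
    ∀ (k : Nat) (s : Int) (ds : List Int),
    s ∈ R →
    ∃ ms, lbeLoopA (PySem.Dict.mk graph) (pvFuel graph) k s ds = some (ds ++ ms) ∧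
      (∀ x ∈ ms, (0:Int) ≤ x) ∧
      ∀ best, lbeLoopB (PySem.Dict.mk graph) (pvFuel graph) k s best =
        ms.foldl (fun b x => if x > b then x else b) best := by
  intro k
  induction k with
  | zero =>
    intro s ds _
    exact ⟨[], by simp [lbeLoopA], by simp, fun best => by simp [lbeLoopB]⟩
  | succ k ih =>
    intro s ds hs
    obtain ⟨lf, df, visf, wf, r1, r2, r3, r4, r5⟩ := bfsAB graph R hRk hRc hsub s hs
    obtain ⟨ms, c1, c2, c3⟩ := ih lf (ds ++ [df]) r4
    refine ⟨df :: ms, ?_, ?_, ?_⟩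
    · rw [lbeLoopA, r1]
      simp only [r3]
      simpa using c1
    · intro x hx
      rcases List.mem_cons.mp hx with rfl | hx
      · exact r5
      · exact c2 x hx
    · intro best
      rw [lbeLoopB]
      simp only [r2, List.foldl_cons]
      exact c3 _

-- ===== VERDICT (by name: the statement is the Claim_ definition above) =====
theorem lower_bound_estimate_spec : Claim_equal_lower_bound_estimate := by
  unfold Claim_equal_lower_bound_estimate
  intro graph start _hdom hpre
  unfold Spec_lower_bound_estimate
  obtain ⟨hstart, hclosed⟩ := hpre
  have hkeys : ∀ v : Int, v ∈ graph.map (·.1) →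
      (PySem.Dict.mk graph).contains v = true := by
    intro v hv
    rw [PySem.Dict.contains_iff_mem_keys]
    simpa [PySem.Dict.keys_mk] using hv
  have hitems : ∀ u (ns : List Int),
      (PySem.Dict.mk graph).get? u = some ns → (u, ns) ∈ graph := by
    intro u ns h
    exact PySem.Dict.mem_items_of_get?_eq_some _ h
  have hRk : ∀ x ∈ reachSet graph start, (PySem.Dict.mk graph).contains x = true :=
    fun x hx => hkeys x (hclosed x hx)
  have hRc : ∀ u ∈ reachSet graph start, ∀ ns,
      (PySem.Dict.mk graph).get? u = some ns → ∀ v ∈ ns, v ∈ reachSet graph start := by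
    intro u hu ns h v hv
    exact reachStep_closed graph (reachSet graph start) (reachSet_fix graph start)
      (u, ns) (hitems u ns h) hu v hv
  have hsub : ∀ u ns, (PySem.Dict.mk graph).get? u = some ns → ∀ v ∈ ns, v ∈ allN graph := by
    intro u ns h v hv
    exact List.mem_flatMap.mpr ⟨(u, ns), hitems u ns h, hv⟩
  obtain ⟨ms, c1, c2, c3⟩ := chainAB graph (reachSet graph start) hRk hRc hsub 11 start []
    (start_mem_reachSet graph start)
  rw [lower_bound_estimate, lower_bound_estimate_alt, c1, c3]
  simpa using maxFold ms c2
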